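-- pv_equiv track=rewrite | github.com/jkminder/arxivable | src/arxivable/steps/todos.py | _remove_empty_makeatletter
-- ===== SOURCE A (Python) =====
-- def _remove_empty_makeatletter(lines: list[str]) -> list[str]:
--     """Remove \\makeatletter/\\makeatother pairs with nothing between them."""
--     result = []
--     i = 0
--     while i < len(lines):
--         if lines[i].strip() == r"\makeatletter":
--             # Look ahead for \makeatother with only blank lines between
--             j = i + 1
--             while j < len(lines) and lines[j].strip() == "":
--                 j += 1
--             if j < len(lines) and lines[j].strip() == r"\makeatother":
--                 i = j + 1
--                 continue
--         result.append(lines[i])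
--         i += 1
--     return result
-- ===== SOURCE B (Python) =====
-- def _remove_empty_makeatletter(lines: list[str]) -> list[str]:
--     """Remove \\makeatletter/\\makeatother pairs with nothing between them.
--
--     Single forward pass with a deferred-emission buffer (state machine),
--     instead of A's nested look-ahead rescan."""
--     result = []
--     pending = None  # buffered "\makeatletter" + following blank lines, or None
--     for line in lines:
--         s = line.strip()
--         if pending is not None:
--             if s == "":
--                 pending.append(line)
--                 continue
--             if s == r"\makeatother":
--                 pending = None  # empty pair: drop the whole buffer
--                 continue
--             result.extend(pending)  # pair failed: flush buffer, re-handle line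
--             pending = None
--         if s == r"\makeatletter":
--             pending = [line]
--         else:
--             result.append(line)
--     if pending is not None:
--         result.extend(pending)
--     return result
-- ===== Notes on version B (the rewrite author's own statement) =====
-- stated objective: alternative
-- what changed: Replaced the index-based loop with a nested blank-skipping look-ahead (which re-visits and re-strips skipped blank lines) by a single forward-pass state machine that buffers a candidate \makeatletter region and either drops or flushes it, stripping each line exactly once.
import Mathlib
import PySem

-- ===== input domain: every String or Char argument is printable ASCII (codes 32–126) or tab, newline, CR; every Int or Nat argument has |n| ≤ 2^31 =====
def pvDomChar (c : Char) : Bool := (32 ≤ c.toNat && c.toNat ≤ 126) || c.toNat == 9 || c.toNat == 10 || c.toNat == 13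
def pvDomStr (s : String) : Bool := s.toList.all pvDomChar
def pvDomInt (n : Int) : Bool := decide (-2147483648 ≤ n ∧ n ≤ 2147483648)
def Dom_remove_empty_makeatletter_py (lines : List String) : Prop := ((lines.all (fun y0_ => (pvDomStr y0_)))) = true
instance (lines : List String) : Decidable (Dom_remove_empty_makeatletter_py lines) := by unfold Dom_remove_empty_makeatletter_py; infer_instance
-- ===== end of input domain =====

-- B replaces A's nested blank-skipping look-ahead by a one-pass state machine with a
-- deferred-emission buffer; same return value (objective: alternative decomposition).

-- ===== PORT A =====
-- A's inner `while j < len(lines) and lines[j].strip() == ""` look-ahead: returns the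
-- suffix of `lines` starting at the first non-blank line.
def pvSkipBlanks : List String → List String
  | [] => []
  | l :: rest => if PySem.Str.strip l = "" then pvSkipBlanks rest else l :: rest

theorem pvSkipBlanks_length_le : ∀ ls : List String, (pvSkipBlanks ls).length ≤ ls.length
  | [] => le_refl _
  | l :: rest => by
      simp only [pvSkipBlanks]
      split
      · exact le_trans (pvSkipBlanks_length_le rest) (Nat.le_succ _)
      · exact le_refl _

-- A's outer while loop, as structural recursion on the suffix of `lines` at index i.
def remove_empty_makeatletter_py (lines : List String) : List String :=
  match lines with
  | [] => []
  | l :: rest =>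
    if PySem.Str.strip l = "\\makeatletter" then
      match h : pvSkipBlanks rest with
      | m :: tail =>
        if PySem.Str.strip m = "\\makeatother" then
          remove_empty_makeatletter_py tail
        else
          l :: remove_empty_makeatletter_py rest
      | [] => l :: remove_empty_makeatletter_py rest
    else
      l :: remove_empty_makeatletter_py rest
  termination_by lines.length
  decreasing_by
  · have := pvSkipBlanks_length_le rest
    rw [h] at this
    simp at this ⊢
    omega
  · simp only [List.length_cons]; omega
  · simp only [List.length_cons]; omega
  · simp only [List.length_cons]; omega

-- ===== PORT B =====
-- B's loop: `pending` is the buffered candidate region (none when not buffering).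
def pvMachine : List String → Option (List String) → List String
  | [], none => []
  | [], some p => p
  | l :: rest, none =>
      if PySem.Str.strip l = "\\makeatletter" then pvMachine rest (some [l])
      else l :: pvMachine rest none
  | l :: rest, some p =>
      if PySem.Str.strip l = "" then pvMachine rest (some (p ++ [l]))
      else if PySem.Str.strip l = "\\makeatother" then pvMachine rest none
      else
        p ++ (if PySem.Str.strip l = "\\makeatletter" then pvMachine rest (some [l])
              else l :: pvMachine rest none)

def remove_empty_makeatletter_py_alt (lines : List String) : List String :=
  pvMachine lines none

-- ===== PRECONDITION & SPEC =====
def Spec_remove_empty_makeatletter_py (lines : List String) (out : List String) : Prop := out = remove_empty_makeatletter_py_alt lines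
instance (lines : List String) (out : List String) : Decidable (Spec_remove_empty_makeatletter_py lines out) := by unfold Spec_remove_empty_makeatletter_py; infer_instance

-- ===== CLAIM (what is proved, stated in full; the proofs are below) =====
def Claim_equal_remove_empty_makeatletter_py : Prop := ∀ (lines : List String), Dom_remove_empty_makeatletter_py lines → Spec_remove_empty_makeatletter_py lines (remove_empty_makeatletter_py lines)

-- ===== LEMMAS AND PROOFS =====

theorem pvA_nil : remove_empty_makeatletter_py [] = [] := by
  rw [remove_empty_makeatletter_py]

theorem pvA_notletter (l : String) (rest : List String)
    (hl : ¬ PySem.Str.strip l = "\\makeatletter") :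
    remove_empty_makeatletter_py (l :: rest) = l :: remove_empty_makeatletter_py rest := by
  rw [remove_empty_makeatletter_py, if_neg hl]

theorem pvA_pair (l : String) (rest : List String) (m : String) (tail : List String)
    (hl : PySem.Str.strip l = "\\makeatletter")
    (hsk : pvSkipBlanks rest = m :: tail)
    (hm : PySem.Str.strip m = "\\makeatother") :
    remove_empty_makeatletter_py (l :: rest) = remove_empty_makeatletter_py tail := by
  rw [remove_empty_makeatletter_py, if_pos hl]
  split
  next m' tail' heq =>
    rw [hsk] at heq
    cases heq
    rw [if_pos hm]
  next heq =>
    rw [hsk] at heq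
    simp at heq

theorem pvA_fail_cons (l : String) (rest : List String) (m : String) (tail : List String)
    (hl : PySem.Str.strip l = "\\makeatletter")
    (hsk : pvSkipBlanks rest = m :: tail)
    (hm : ¬ PySem.Str.strip m = "\\makeatother") :
    remove_empty_makeatletter_py (l :: rest) = l :: remove_empty_makeatletter_py rest := by
  rw [remove_empty_makeatletter_py, if_pos hl]
  split
  next m' tail' heq =>
    rw [hsk] at heq
    cases heq
    rw [if_neg hm]
  next heq =>
    rw [hsk] at heq

theorem pvA_fail_nil (l : String) (rest : List String)
    (hl : PySem.Str.strip l = "\\makeatletter")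
    (hsk : pvSkipBlanks rest = []) :
    remove_empty_makeatletter_py (l :: rest) = l :: remove_empty_makeatletter_py rest := by
  rw [remove_empty_makeatletter_py, if_pos hl]
  split
  next m' tail' heq =>
    rw [hsk] at heq
    simp at heq
  next heq => rfl

theorem pvSkipBlanks_append_blank (bl : List String)
    (hb : ∀ b ∈ bl, PySem.Str.strip b = "") (xs : List String) :
    pvSkipBlanks (bl ++ xs) = pvSkipBlanks xs := by
  induction bl with
  | nil => rfl
  | cons b bl ih =>
      have hbs : PySem.Str.strip b = "" := hb b (List.mem_cons_self ..)
      simp only [List.cons_append, pvSkipBlanks, hbs, if_pos]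
      exact ih (fun x hx => hb x (List.mem_cons_of_mem _ hx))

theorem pvA_blank_prefix (bl : List String)
    (hb : ∀ b ∈ bl, PySem.Str.strip b = "") (xs : List String) :
    remove_empty_makeatletter_py (bl ++ xs) = bl ++ remove_empty_makeatletter_py xs := by
  induction bl with
  | nil => rfl
  | cons b bl ih =>
      have hbs : PySem.Str.strip b = "" := hb b (List.mem_cons_self ..)
      have hne : ¬ PySem.Str.strip b = "\\makeatletter" := by
        rw [hbs]; decide
      rw [List.cons_append, pvA_notletter b _ hne,
        ih (fun x hx => hb x (List.mem_cons_of_mem _ hx)), List.cons_append]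

-- Combined invariant: in the `none` state the machine computes A on the remaining
-- lines; in the buffering state `some (first :: bl)` (a `\makeatletter` line followed
-- by blank lines) it computes A on the buffered region re-prepended.
theorem pvMachine_eq (n : Nat) : ∀ ls : List String, ls.length ≤ n →
    (pvMachine ls none = remove_empty_makeatletter_py ls) ∧
    (∀ first bl, PySem.Str.strip first = "\\makeatletter" →
      (∀ b ∈ bl, PySem.Str.strip b = "") →
      pvMachine ls (some (first :: bl)) =
        remove_empty_makeatletter_py (first :: (bl ++ ls))) := by
  induction n with
  | zero =>
      intro ls hls
      have h0 : ls = [] := List.eq_nil_of_length_eq_zero (Nat.le_zero.mp hls)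
      subst h0
      refine ⟨by rw [pvMachine, pvA_nil], ?_⟩
      intro first bl hf hb
      have hsb : pvSkipBlanks bl = [] := by
        simpa using pvSkipBlanks_append_blank bl hb []
      have hAbl : remove_empty_makeatletter_py bl = bl := by
        have h := pvA_blank_prefix bl hb []
        simpa [pvA_nil] using h
      rw [pvMachine, List.append_nil, pvA_fail_nil first bl hf hsb, hAbl]
  | succ n ih =>
      intro ls hls
      match ls with
      | [] => exact (ih [] (Nat.zero_le n))
      | l :: rest =>
        have hr : rest.length ≤ n := by simpa using hls
        have hnone : pvMachine (l :: rest) none = remove_empty_makeatletter_py (l :: rest) := by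
          rw [pvMachine]
          by_cases hl : PySem.Str.strip l = "\\makeatletter"
          · rw [if_pos hl]
            have := (ih rest hr).2 l [] hl (by intro b hb; cases hb)
            rw [this]
            simp
          · rw [if_neg hl, (ih rest hr).1, pvA_notletter l rest hl]
        refine ⟨hnone, ?_⟩
        intro first bl hf hb
        rw [pvMachine]
        by_cases h1 : PySem.Str.strip l = ""
        · -- blank: extend the buffer
          rw [if_pos h1]
          have hb' : ∀ b ∈ bl ++ [l], PySem.Str.strip b = "" := by
            intro b hbmem
            rcases List.mem_append.mp hbmem with h | h
            · exact hb b h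
            · simpa [List.mem_singleton.mp h] using h1
          have := (ih rest hr).2 first (bl ++ [l]) hf hb'
          simpa [List.append_assoc] using this
        · have hskip : pvSkipBlanks (bl ++ l :: rest) = l :: rest := by
            rw [pvSkipBlanks_append_blank bl hb, pvSkipBlanks, if_neg h1]
          by_cases h2 : PySem.Str.strip l = "\\makeatother"
          · -- matched pair: drop the buffer
            rw [if_neg h1, if_pos h2, (ih rest hr).1,
              pvA_pair first (bl ++ l :: rest) l rest hf hskip h2]
          · -- pair failed: flush the buffer, re-handle l
            rw [if_neg h1, if_neg h2,
              pvA_fail_cons first (bl ++ l :: rest) l rest hf hskip h2,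
              pvA_blank_prefix bl hb (l :: rest), ← hnone, pvMachine]
            simp only [List.cons_append]

-- ===== VERDICT (by name: the statement is the Claim_ definition above) =====
theorem remove_empty_makeatletter_py_spec : Claim_equal_remove_empty_makeatletter_py := by
  intro lines _
  unfold Spec_remove_empty_makeatletter_py remove_empty_makeatletter_py_alt
  exact ((pvMachine_eq lines.length lines (le_refl _)).1).symm
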